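-- pv_equiv track=rewrite | github.com/MCaburrasi/Programacion | src/Python/UD4 - Estructuras de datos/Cadenas/Actividades/actividad21.py | mayuscula_ascii
-- ===== SOURCE A (Python) =====
-- def mayuscula_ascii(cadena):
--     resultado = ''
--     for char in cadena:
--         if 65 <= ord(char) <= 90:
--             resultado += char
--         elif ord(char) == 32:
--             resultado += char
--         else:
--             char_ascii = ord(char) - 32
--             resultado += chr(char_ascii)
--     return resultado
-- ===== SOURCE B (Python) =====
-- def mayuscula_ascii(cadena):
--     tabla = {c: chr(ord(c) - 32) for c in set(cadena)
--              if not (65 <= ord(c) <= 90 or ord(c) == 32)}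
--     return cadena.translate(str.maketrans(tabla))
-- ===== Notes on version B (the rewrite author's own statement) =====
-- stated objective: idiomatic
-- what changed: B replaces the per-character branch-and-append loop by building a translation table from the distinct characters (omitting A-Z and space) and doing a single str.translate pass.
import Mathlib
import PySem

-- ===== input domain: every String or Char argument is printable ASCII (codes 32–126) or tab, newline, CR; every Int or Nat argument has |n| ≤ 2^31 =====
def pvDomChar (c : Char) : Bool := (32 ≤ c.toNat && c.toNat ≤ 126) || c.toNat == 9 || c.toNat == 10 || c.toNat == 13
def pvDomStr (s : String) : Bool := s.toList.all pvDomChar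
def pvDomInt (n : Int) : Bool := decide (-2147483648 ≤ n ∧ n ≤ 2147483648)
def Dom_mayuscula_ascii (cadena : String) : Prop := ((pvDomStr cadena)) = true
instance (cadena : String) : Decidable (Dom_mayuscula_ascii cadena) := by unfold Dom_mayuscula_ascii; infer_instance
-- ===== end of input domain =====

-- B builds a translation table over the distinct characters (leaving A-Z and space out) and maps
-- the string through it in one pass, instead of A's per-character branch-and-append loop.
-- Both A and B raise ValueError (chr of a negative number) on characters with code < 32; Pre_ excludes those.

-- ===== PORT A =====
def mayuscula_ascii (cadena : String) : String :=
  String.ofList (cadena.toList.foldl (fun resultado char =>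
    if 65 ≤ char.toNat ∧ char.toNat ≤ 90 then resultado ++ [char]
    else if char.toNat = 32 then resultado ++ [char]
    else resultado ++ [Char.ofNat (char.toNat - 32)]) [])   -- chr(ord(char)-32); exact for codes ≥ 32 (Pre_)

-- ===== PORT B =====
def mayuscula_ascii_alt (cadena : String) : String :=
  let tabla : PySem.Dict Char Char :=
    (PySem.Set.ofList cadena.toList).foldl (fun d c =>
      if ¬ ((65 ≤ c.toNat ∧ c.toNat ≤ 90) ∨ c.toNat = 32) then
        d.insert c (Char.ofNat (c.toNat - 32))   -- chr(ord(c)-32); exact for codes ≥ 32 (Pre_)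
      else d) PySem.Dict.empty
  -- cadena.translate(tabla): each character replaced by its table entry, identity if absent
  String.ofList (cadena.toList.map (fun c => tabla.getD c c))

-- ===== PRECONDITION & SPEC =====
-- Pre_ excludes strings containing a character with code < 32 (tab/newline/CR inside Dom):
-- there chr(ord(c)-32) raises ValueError in A (and in B's table comprehension).
def Pre_mayuscula_ascii (cadena : String) : Prop :=
  cadena.toList.all (fun c => 32 ≤ c.toNat) = true
instance (cadena : String) : Decidable (Pre_mayuscula_ascii cadena) := by
  unfold Pre_mayuscula_ascii; infer_instance

def pvWitness_mayuscula_ascii : String := "Hola Mundo!"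

def Spec_mayuscula_ascii (cadena : String) (out : String) : Prop := out = mayuscula_ascii_alt cadena
instance (cadena : String) (out : String) : Decidable (Spec_mayuscula_ascii cadena out) := by unfold Spec_mayuscula_ascii; infer_instance

-- ===== CLAIM (what is proved, stated in full; the proofs are below) =====
def Claim_equal_mayuscula_ascii : Prop := ∀ (cadena : String), Dom_mayuscula_ascii cadena → Pre_mayuscula_ascii cadena → Spec_mayuscula_ascii cadena (mayuscula_ascii cadena)

-- ===== LEMMAS AND PROOFS =====

-- the per-character transform both programs compute
def pvStep (c : Char) : Char :=
  if (65 ≤ c.toNat ∧ c.toNat ≤ 90) ∨ c.toNat = 32 then c else Char.ofNat (c.toNat - 32)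

-- A's loop appends exactly pvStep of each character
theorem pvA_foldl (l acc : List Char) :
    l.foldl (fun resultado char =>
      if 65 ≤ char.toNat ∧ char.toNat ≤ 90 then resultado ++ [char]
      else if char.toNat = 32 then resultado ++ [char]
      else resultado ++ [Char.ofNat (char.toNat - 32)]) acc = acc ++ l.map pvStep := by
  induction l generalizing acc with
  | nil => simp
  | cons c l ih =>
    simp only [List.foldl_cons, List.map_cons]
    have hstep : (if 65 ≤ c.toNat ∧ c.toNat ≤ 90 then acc ++ [c]
        else if c.toNat = 32 then acc ++ [c]
        else acc ++ [Char.ofNat (c.toNat - 32)]) = acc ++ [pvStep c] := by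
      unfold pvStep
      by_cases h1 : 65 ≤ c.toNat ∧ c.toNat ≤ 90 <;> by_cases h2 : c.toNat = 32 <;>
        simp [h1, h2]
    rw [hstep, ih]
    simp

-- lookup in B's table: present iff the character occurs and is not kept
theorem pvTable_get? (l : List Char) (d : PySem.Dict Char Char) (c : Char) :
    (l.foldl (fun d c =>
      if ¬ ((65 ≤ c.toNat ∧ c.toNat ≤ 90) ∨ c.toNat = 32) then
        d.insert c (Char.ofNat (c.toNat - 32))
      else d) d).get? c =
    if c ∈ l ∧ ¬ ((65 ≤ c.toNat ∧ c.toNat ≤ 90) ∨ c.toNat = 32) then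
      some (Char.ofNat (c.toNat - 32))
    else d.get? c := by
  induction l generalizing d with
  | nil => simp
  | cons x l ih =>
    simp only [List.foldl_cons]
    by_cases hx : ¬ ((65 ≤ x.toNat ∧ x.toNat ≤ 90) ∨ x.toNat = 32)
    · rw [if_pos hx, ih]
      by_cases hc : c ∈ l ∧ ¬ ((65 ≤ c.toNat ∧ c.toNat ≤ 90) ∨ c.toNat = 32)
      · rw [if_pos hc, if_pos ⟨List.mem_cons_of_mem _ hc.1, hc.2⟩]
      · rw [if_neg hc]
        by_cases hcx : c = x
        · subst hcx
          rw [if_pos ⟨List.mem_cons_self, hx⟩, PySem.Dict.get?_insert_self]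
        · have hout : ¬ (c ∈ x :: l ∧ ¬ ((65 ≤ c.toNat ∧ c.toNat ≤ 90) ∨ c.toNat = 32)) := by
            intro ⟨hm, hk⟩
            rcases List.mem_cons.mp hm with h | h
            · exact hcx h
            · exact hc ⟨h, hk⟩
          rw [if_neg hout, PySem.Dict.get?_insert_of_ne]
          simpa using hcx
    · rw [if_neg hx, ih]
      by_cases hc : c ∈ l ∧ ¬ ((65 ≤ c.toNat ∧ c.toNat ≤ 90) ∨ c.toNat = 32)
      · rw [if_pos hc, if_pos ⟨List.mem_cons_of_mem _ hc.1, hc.2⟩]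
      · have hout : ¬ (c ∈ x :: l ∧ ¬ ((65 ≤ c.toNat ∧ c.toNat ≤ 90) ∨ c.toNat = 32)) := by
          intro ⟨hm, hk⟩
          rcases List.mem_cons.mp hm with h | h
          · subst h; exact hx hk
          · exact hc ⟨h, hk⟩
        rw [if_neg hc, if_neg hout]

-- B's per-character lookup equals pvStep for characters of the string
theorem pvB_lookup (cadena : String) (c : Char) (hc : c ∈ cadena.toList) :
    (PySem.Dict.getD
      ((PySem.Set.ofList cadena.toList).foldl (fun d c =>
        if ¬ ((65 ≤ c.toNat ∧ c.toNat ≤ 90) ∨ c.toNat = 32) then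
          d.insert c (Char.ofNat (c.toNat - 32))
        else d) PySem.Dict.empty) c c) = pvStep c := by
  rw [PySem.Dict.getD, pvTable_get?]
  by_cases hk : (65 ≤ c.toNat ∧ c.toNat ≤ 90) ∨ c.toNat = 32
  · simp [pvStep, hk]
  · have hmem : c ∈ PySem.Set.ofList cadena.toList := by
      simpa [PySem.Set.mem_ofList] using hc
    simp [pvStep, hk, hmem]

-- ===== VERDICT (by name: the statement is the Claim_ definition above) =====
theorem mayuscula_ascii_spec : Claim_equal_mayuscula_ascii := by
  intro cadena _ _
  unfold Spec_mayuscula_ascii mayuscula_ascii mayuscula_ascii_alt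
  rw [pvA_foldl]
  simp only [List.nil_append]
  congr 1
  exact (List.map_congr_left (fun c hc => (pvB_lookup cadena c hc).symm))
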